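-- pv_equiv track=rewrite | github.com/bjarkemoensted/adventofcode | 2023/solution05.py | build_paths
-- ===== SOURCE A (Python) =====
-- def get_destination_intervals(source_interval, mappings):
--     """Takes an interval (low, high) and a list of mappings.
--     Returns a list of the intervals mapped to by the input interval.
--     For example source_interval=(1, 10) and mappings = [(12, 5, 3)] would give
--     [(1, 5), (12, 15), (9, 10)] because only the mapping is only applied
--     to the sub-interval (5, 8), resulting in (12, 15).
--     The remainder of the interval is mapped to itself.
--     This is equivalent to mapping each individual element in the interval, but much more efficient."""
--
--     # Start with the low and high limits of the source interval
--     low, high = source_interval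
--     res = []
--
--     # Order the mappings by the lower limit of the intervals to which they apply
--     for mapping in sorted(mappings, key=lambda t: t[1]):
--         # Break mapping into the lower limits of where the mapping goes to and from, respectively, and the interval size
--         dest_low, domain_low, n = mapping
--         shift = dest_low - domain_low
--         domain_high = domain_low + n
--
--         # If there's no overlap between mapping and source interval, there's nothing to do
--         miss = (low >= domain_high) or (high < domain_low)
--         if miss:
--             continue
--
--         # Any values below the mapping range are mapped to themselves
--         if low < domain_low:
--             # use identity mapping for the lower part of source
--             res.append((low, domain_low))
--             low = domain_low
--
--         # The overlap between the source and the mapping is then mapped to the destination range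
--         newhigh = min(high, domain_high)
--         res.append((low + shift, newhigh + shift))
--
--         low = newhigh
--
--     # If any values remain after applying all maps, they map to themselves
--     if low < high:
--         res.append((low, high))
--
--     return res
--
-- def build_paths(start_nodes, maps):
--     """Takes a list of intervals e.g. [(79, 93), (55, 68)] and a list of mappings.
--     The mappings are sequentially applied to produce all possible paths from intervals of starting (seed)
--     values to intervals of location values."""
--
--     # To start, each path is just the start node
--     paths = [[n] for n in start_nodes]
--     for maplist in maps:
--         new_paths = []
--         # Grow each path by the intervals mapped to (seed numbers to soild numbers, etc)
--         for path in paths: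
--             endnode = path[-1]
--             for newnode in get_destination_intervals(endnode, maplist):
--                 new_path = path + [newnode]
--                 new_paths.append(new_path)
--             #
--         paths = new_paths
--
--     return paths
-- ===== SOURCE B (Python) =====
-- def get_destination_intervals(source_interval, mappings):
--     low, high = source_interval
--     res = []
--     for mapping in sorted(mappings, key=lambda t: t[1]):
--         dest_low, domain_low, n = mapping
--         shift = dest_low - domain_low
--         domain_high = domain_low + n
--         miss = (low >= domain_high) or (high < domain_low)
--         if miss:
--             continue
--         if low < domain_low:
--             res.append((low, domain_low))
--             low = domain_low
--         newhigh = min(high, domain_high)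
--         res.append((low + shift, newhigh + shift))
--         low = newhigh
--     if low < high:
--         res.append((low, high))
--     return res
--
--
-- def build_paths(start_nodes, maps):
--     """Depth-first recursive expansion: extend each partial path through the
--     remaining maps, concatenating the completed paths in order."""
--     def extend(path, idx):
--         if idx == len(maps):
--             return [path]
--         out = []
--         for newnode in get_destination_intervals(path[-1], maps[idx]):
--             out += extend(path + [newnode], idx + 1)
--         return out
--
--     result = []
--     for n in start_nodes:
--         result += extend([n], 0)
--     return result
-- ===== Notes on version B (the rewrite author's own statement) =====
-- stated objective: alternative
-- what changed: Replaces A's level-by-level BFS frontier rebuild with a recursive depth-first extend(path, idx) that completes each path down to the leaves before moving on; leaf order is preserved.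
import Mathlib
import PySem

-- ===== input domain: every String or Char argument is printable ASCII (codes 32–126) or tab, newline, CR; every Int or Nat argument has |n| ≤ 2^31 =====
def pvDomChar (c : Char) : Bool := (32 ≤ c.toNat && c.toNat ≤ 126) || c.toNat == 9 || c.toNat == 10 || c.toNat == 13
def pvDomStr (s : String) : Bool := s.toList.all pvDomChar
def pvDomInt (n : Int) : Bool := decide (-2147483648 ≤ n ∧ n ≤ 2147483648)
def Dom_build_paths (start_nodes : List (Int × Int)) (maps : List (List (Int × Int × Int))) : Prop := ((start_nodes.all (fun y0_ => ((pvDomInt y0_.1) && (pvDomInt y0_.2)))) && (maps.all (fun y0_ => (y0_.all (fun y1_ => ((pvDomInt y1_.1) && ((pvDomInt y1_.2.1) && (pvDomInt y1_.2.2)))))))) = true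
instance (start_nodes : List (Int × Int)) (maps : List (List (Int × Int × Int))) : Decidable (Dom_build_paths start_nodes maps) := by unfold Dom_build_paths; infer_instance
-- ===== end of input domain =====

-- B replaces A's level-by-level frontier rebuild with a recursive depth-first
-- expansion of each path; same results in the same order (objective: alternative).

-- ===== PORT A =====
-- shared helper: both Pythons contain this same get_destination_intervals
def get_destination_intervals (source_interval : Int × Int) (mappings : List (Int × Int × Int)) : List (Int × Int) :=
  let low := source_interval.1
  let high := source_interval.2
  let st := (PySem.List.sorted mappings (fun t => t.2.1) false).foldl
    (fun (acc : Int × List (Int × Int)) mapping =>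
      let low := acc.1
      let res := acc.2
      let dest_low := mapping.1
      let domain_low := mapping.2.1
      let n := mapping.2.2
      let shift := dest_low - domain_low
      let domain_high := domain_low + n
      if low ≥ domain_high ∨ high < domain_low then acc
      else
        let lr : Int × List (Int × Int) :=
          if low < domain_low then (domain_low, res ++ [(low, domain_low)]) else (low, res)
        let newhigh := min high domain_high
        (newhigh, lr.2 ++ [(lr.1 + shift, newhigh + shift)]))
    (low, [])
  if st.1 < high then st.2 ++ [(st.1, high)] else st.2

def build_paths (start_nodes : List (Int × Int)) (maps : List (List (Int × Int × Int))) : List (List (Int × Int)) :=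
  let paths := start_nodes.map (fun n => [n])
  maps.foldl (fun paths maplist =>
    paths.foldl (fun new_paths path =>
      -- path[-1]: path is always nonempty here, default never used
      let endnode := (PySem.List.pyGet? path (-1)).getD (0, 0)
      (get_destination_intervals endnode maplist).foldl
        (fun new_paths newnode => new_paths ++ [path ++ [newnode]]) new_paths) []) paths

-- ===== PORT B =====
-- extend(path, idx): recursion over the remaining maps
def extendPath (path : List (Int × Int)) : List (List (Int × Int × Int)) → List (List (Int × Int))
  | [] => [path]
  | m :: ms =>
      let endnode := (PySem.List.pyGet? path (-1)).getD (0, 0)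
      (get_destination_intervals endnode m).foldl
        (fun out newnode => out ++ extendPath (path ++ [newnode]) ms) []

def build_paths_alt (start_nodes : List (Int × Int)) (maps : List (List (Int × Int × Int))) : List (List (Int × Int)) :=
  start_nodes.foldl (fun result n => result ++ extendPath [n] maps) []

-- ===== PRECONDITION & SPEC =====
def Spec_build_paths (start_nodes : List (Int × Int)) (maps : List (List (Int × Int × Int))) (out : List (List (Int × Int))) : Prop := out = build_paths_alt start_nodes maps
instance (start_nodes : List (Int × Int)) (maps : List (List (Int × Int × Int))) (out : List (List (Int × Int))) : Decidable (Spec_build_paths start_nodes maps out) := by unfold Spec_build_paths; infer_instance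

-- ===== CLAIM (what is proved, stated in full; the proofs are below) =====
def Claim_equal_build_paths : Prop := ∀ (start_nodes : List (Int × Int)) (maps : List (List (Int × Int × Int))), Dom_build_paths start_nodes maps → Spec_build_paths start_nodes maps (build_paths start_nodes maps)

-- ===== LEMMAS AND PROOFS =====

theorem extendPath_cons (p : List (Int × Int)) (m : List (Int × Int × Int))
    (ms : List (List (Int × Int × Int))) :
    extendPath p (m :: ms)
      = (get_destination_intervals ((PySem.List.pyGet? p (-1)).getD (0, 0)) m).flatMap
          (fun nn => extendPath (p ++ [nn]) ms) := by
  simp [extendPath, PySem.List.foldl_append_eq_flatMap, List.flatMap_def]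

-- one BFS step of A equals one expansion level, expressed with flatMap
theorem stepA (maplist : List (Int × Int × Int)) :
    ∀ (paths : List (List (Int × Int))) (init : List (List (Int × Int))),
    paths.foldl (fun new_paths path =>
      let endnode := (PySem.List.pyGet? path (-1)).getD (0, 0)
      (get_destination_intervals endnode maplist).foldl
        (fun new_paths newnode => new_paths ++ [path ++ [newnode]]) new_paths) init
    = init ++ paths.flatMap (fun p =>
        (get_destination_intervals ((PySem.List.pyGet? p (-1)).getD (0, 0)) maplist).map
          (fun nn => p ++ [nn])) := by
  intro paths
  induction paths with
  | nil => simp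
  | cons p ps ih =>
      intro init
      simp only [List.foldl_cons, List.flatMap_cons]
      rw [PySem.List.foldl_append_singleton_eq_map, ih, List.append_assoc]

-- A's whole loop equals DFS expansion of every frontier path
theorem loop_eq (maps : List (List (Int × Int × Int))) :
    ∀ (paths : List (List (Int × Int))),
    maps.foldl (fun paths maplist =>
      paths.foldl (fun new_paths path =>
        let endnode := (PySem.List.pyGet? path (-1)).getD (0, 0)
        (get_destination_intervals endnode maplist).foldl
          (fun new_paths newnode => new_paths ++ [path ++ [newnode]]) new_paths) []) paths
    = paths.flatMap (fun p => extendPath p maps) := by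
  induction maps with
  | nil => intro paths; simp [extendPath]
  | cons m ms ih =>
      intro paths
      simp only [List.foldl_cons]
      rw [ih, stepA]
      simp only [List.nil_append, List.flatMap_assoc]
      congr 1
      funext p
      rw [extendPath_cons]
      simp [List.flatMap_map]

-- ===== VERDICT (by name: the statement is the Claim_ definition above) =====
theorem build_paths_spec : Claim_equal_build_paths := by
  intro sn maps _
  unfold Spec_build_paths build_paths build_paths_alt
  rw [loop_eq]
  rw [PySem.List.foldl_append_eq_flatMap]
  simp [List.flatMap_map]
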